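-- pv_equiv track=rewrite | github.com/DivijChawla/DivijEncrypt | main.py | linked_word_decrypt
-- ===== SOURCE A (Python) =====
-- def linked_word_decrypt(text):
--     words = text.split(' ')
--     decrypted_words = []
--     prev_len = len(words[0])
--     for i, word in enumerate(words):
--         shift = prev_len
--         decrypted_word = ''.join([chr(((ord(c) - 32 - shift) % 95) + 32) for c in word])
--         decrypted_words.append(decrypted_word)
--         prev_len = len(word)
--     return ' '.join(decrypted_words)
-- ===== SOURCE B (Python) =====
-- def linked_word_decrypt(text):
--     # Stream over characters: no word list is ever built. 'shift' starts as the
--     # length of the leading run of non-space characters; at each space it becomes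
--     # the number of characters seen since the previous space.
--     n = 0
--     while n < len(text) and text[n] != ' ':
--         n += 1
--     shift = n
--     out = []
--     count = 0
--     for ch in text:
--         if ch == ' ':
--             out.append(' ')
--             shift = count
--             count = 0
--         else:
--             out.append(chr(((ord(ch) - 32 - shift) % 95) + 32))
--             count += 1
--     return ''.join(out)
-- ===== Notes on version B (the rewrite author's own statement) =====
-- stated objective: alternative
-- what changed: Replaces A's split-into-words pass (building a word list and decrypting word by word with a prev_len accumulator) by a single character-level streaming pass over the raw text that never builds a word list: a state machine carrying (shift, count) that emits each decrypted character directly and updates shift at every space, seeded by scanning the leading non-space run.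
import Mathlib
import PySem

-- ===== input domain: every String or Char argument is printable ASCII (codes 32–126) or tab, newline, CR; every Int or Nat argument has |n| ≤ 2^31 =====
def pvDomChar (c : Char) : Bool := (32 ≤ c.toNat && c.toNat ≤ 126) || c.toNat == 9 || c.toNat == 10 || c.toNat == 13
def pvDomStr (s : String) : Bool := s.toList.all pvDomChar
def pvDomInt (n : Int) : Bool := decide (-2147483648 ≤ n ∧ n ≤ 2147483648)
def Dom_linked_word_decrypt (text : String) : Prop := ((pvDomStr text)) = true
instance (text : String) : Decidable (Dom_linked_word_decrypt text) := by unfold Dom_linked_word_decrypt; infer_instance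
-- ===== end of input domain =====

-- B replaces A's split-into-words loop by a single character-level streaming pass over the raw text
-- (no word list is built): a state machine carrying (shift, count) updated at each space (alternative decomposition, same cost).

-- ===== PORT A =====
-- character transform: chr(((ord(c) - 32 - shift) % 95) + 32) — identical expression in both Pythons
def pvDecChar (shift : Int) (c : Char) : Char :=
  Char.ofNat (PySem.Int.mod ((c.toNat : Int) - 32 - shift) 95 + 32).toNat

-- A's word transform: ''.join([chr(...) for c in word])
def pvDecWord (shift : Int) (w : List Char) : List Char :=
  PySem.Chars.join [] (w.map (fun c => [pvDecChar shift c]))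

def linked_word_decrypt (text : String) : String :=
  let words := PySem.Chars.splitOn text.toList [' ']
  -- words is never empty (split(' ') on '' gives ['']), so words[0] is headD; exact
  let prevLen0 : Int := ((words.headD []).length : Int)
  let st := words.foldl
    (fun (st : List (List Char) × Int) word =>
      (st.1 ++ [pvDecWord st.2 word], (word.length : Int)))
    ([], prevLen0)
  String.ofList (PySem.Chars.join [' '] st.1)

-- ===== PORT B =====
-- Source B's initial while loop: scan characters until the first space, counting them
def pvCountNonSpace : List Char → Int
  | [] => 0
  | c :: r => if c = ' ' then 0 else 1 + pvCountNonSpace r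

def linked_word_decrypt_alt (text : String) : String :=
  let shift0 := pvCountNonSpace text.toList
  let st := text.toList.foldl
    (fun (st : List Char × Int × Int) ch =>
      if ch = ' ' then (st.1 ++ [' '], st.2.2, 0)
      else (st.1 ++ [pvDecChar st.2.1 ch], st.2.1, st.2.2 + 1))
    ([], shift0, 0)
  String.ofList st.1

-- ===== PRECONDITION & SPEC =====
def Spec_linked_word_decrypt (text : String) (out : String) : Prop := out = linked_word_decrypt_alt text
instance (text : String) (out : String) : Decidable (Spec_linked_word_decrypt text out) := by unfold Spec_linked_word_decrypt; infer_instance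

-- ===== CLAIM (what is proved, stated in full; the proofs are below) =====
def Claim_equal_linked_word_decrypt : Prop := ∀ (text : String), Dom_linked_word_decrypt text → Spec_linked_word_decrypt text (linked_word_decrypt text)

-- ===== LEMMAS AND PROOFS =====

-- structural characterisation of split(' ') (single-character separator)
def pvSplit : List Char → List (List Char)
  | [] => [[]]
  | c :: r => if c = ' ' then [] :: pvSplit r else (pvSplit r).modifyHead (c :: ·)

theorem pvSplit_ne_nil (l : List Char) : pvSplit l ≠ [] := by
  induction l with
  | nil => simp [pvSplit]
  | cons c r ih =>
    simp only [pvSplit]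
    split_ifs
    · simp
    · cases h : pvSplit r with
      | nil => exact absurd h ih
      | cons w ws => simp [List.modifyHead]

theorem pv_go_eq (fuel : Nat) :
    ∀ (l cur : List Char) (acc : List (List Char)), l.length ≤ fuel →
      PySem.Chars.splitOn.go [' '] fuel l cur acc
        = acc.reverse ++ (pvSplit l).modifyHead (cur.reverse ++ ·) := by
  induction fuel with
  | zero =>
    intro l cur acc h
    have : l = [] := List.eq_nil_of_length_eq_zero (Nat.le_zero.mp h)
    subst this
    simp [PySem.Chars.splitOn.go, pvSplit]
  | succ fuel ih =>
    intro l cur acc h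
    cases l with
    | nil => simp [PySem.Chars.splitOn.go, pvSplit]
    | cons c r =>
      by_cases hc : c = ' '
      · subst hc
        have hp : List.isPrefixOf [' '] (' ' :: r) = true := by
          simp [List.isPrefixOf]
        rw [show PySem.Chars.splitOn.go [' '] (fuel + 1) (' ' :: r) cur acc
              = PySem.Chars.splitOn.go [' '] fuel r [] (cur.reverse :: acc) from by
            simp [PySem.Chars.splitOn.go, hp]]
        rw [ih r [] (cur.reverse :: acc) (by simpa using Nat.lt_succ_iff.mp (by simpa using h))]
        simp only [pvSplit, List.reverse_cons, List.modifyHead, List.append_assoc]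
        cases pvSplit r <;> simp
      · have hp : List.isPrefixOf [' '] (c :: r) = false := by
          simp [List.isPrefixOf]; exact fun h' => hc h'.symm
        rw [show PySem.Chars.splitOn.go [' '] (fuel + 1) (c :: r) cur acc
              = PySem.Chars.splitOn.go [' '] fuel r (c :: cur) acc from by
            simp [PySem.Chars.splitOn.go, hp]]
        rw [ih r (c :: cur) acc (by simpa using Nat.lt_succ_iff.mp (by simpa using h))]
        simp only [pvSplit, if_neg hc]
        cases hs : pvSplit r with
        | nil => exact absurd hs (pvSplit_ne_nil r)
        | cons w ws => simp [List.modifyHead]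

theorem pv_splitOn_eq (l : List Char) :
    PySem.Chars.splitOn l [' '] = pvSplit l := by
  show PySem.Chars.splitOn.go [' '] (l.length + 1) l [] [] = pvSplit l
  rw [pv_go_eq (l.length + 1) l [] [] (by omega)]
  cases h : pvSplit l with
  | nil => exact absurd h (pvSplit_ne_nil l)
  | cons w ws => simp [List.modifyHead]

-- pvDecWord is just a map
theorem pvDecWord_eq_map (s : Int) (w : List Char) :
    pvDecWord s w = w.map (pvDecChar s) := by
  unfold pvDecWord
  rw [show w.map (fun c => [pvDecChar s c]) = (w.map (pvDecChar s)).map ([·]) by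
    simp [List.map_map]]
  exact PySem.Chars.join_nil_singletons _

-- A's foldl accumulator characterised as a zip with the shifted length sequence
theorem pv_foldl_eq_zip (ws : List (List Char)) (acc : List (List Char)) (s0 : Int) :
    (ws.foldl
      (fun (st : List (List Char) × Int) word =>
        (st.1 ++ [pvDecWord st.2 word], (word.length : Int)))
      (acc, s0)).1
    = acc ++ (ws.zip (s0 :: ws.map (fun w => (w.length : Int)))).map
        (fun p => pvDecWord p.2 p.1) := by
  induction ws generalizing acc s0 with
  | nil => simp
  | cons w ws ih => simp [List.foldl, List.zip_cons_cons, ih]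

-- the joined word-level output with an explicit running shift/count
def pvG : List (List Char) → Int → Int → List Char
  | [], _, _ => []
  | [w], s, _ => pvDecWord s w
  | w :: v :: vs, s, k => pvDecWord s w ++ ' ' :: pvG (v :: vs) (k + w.length) 0

-- A's joined zip output equals pvG
theorem pv_join_zip_eq_G (ws : List (List Char)) :
    ∀ (w : List Char) (s : Int),
      PySem.Chars.join [' ']
        (((w :: ws).zip (s :: (w :: ws).map (fun u => (u.length : Int)))).map
          (fun p => pvDecWord p.2 p.1))
      = pvG (w :: ws) s 0 := by
  induction ws with
  | nil => intro w s; simp [pvG, PySem.Chars.join_singleton]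
  | cons v vs ih =>
    intro w s
    simp only [List.map_cons, List.zip_cons_cons, List.map]
    rw [PySem.Chars.join_cons_cons]
    have := ih v ((w.length : Int))
    simp only [List.map_cons, List.zip_cons_cons, List.map] at this
    simp only [pvG, this]
    norm_num

-- B's char fold unrolled
def pvF : List Char → Int → Int → List Char
  | [], _, _ => []
  | c :: r, s, k =>
    if c = ' ' then ' ' :: pvF r k 0 else pvDecChar s c :: pvF r s (k + 1)

theorem pv_charfold_eq_F (l : List Char) :
    ∀ (out : List Char) (s k : Int),
      (l.foldl
        (fun (st : List Char × Int × Int) ch =>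
          if ch = ' ' then (st.1 ++ [' '], st.2.2, 0)
          else (st.1 ++ [pvDecChar st.2.1 ch], st.2.1, st.2.2 + 1))
        (out, s, k)).1 = out ++ pvF l s k := by
  induction l with
  | nil => intro out s k; simp [pvF]
  | cons c r ih =>
    intro out s k
    by_cases hc : c = ' '
    · subst hc; simp [List.foldl, pvF, ih]
    · simp [List.foldl, pvF, hc, ih]

theorem pv_F_eq_G (l : List Char) : ∀ (s k : Int), pvF l s k = pvG (pvSplit l) s k := by
  induction l with
  | nil => intro s k; simp [pvF, pvSplit, pvG, pvDecWord]
  | cons c r ih =>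
    intro s k
    by_cases hc : c = ' '
    · subst hc
      simp only [pvF, pvSplit, ih]
      cases hs : pvSplit r with
      | nil => exact absurd hs (pvSplit_ne_nil r)
      | cons w ws =>
        simp [pvG, pvDecWord_eq_map]
    · simp only [pvF, if_neg hc, pvSplit, ih]
      cases hs : pvSplit r with
      | nil => exact absurd hs (pvSplit_ne_nil r)
      | cons w ws =>
        cases ws with
        | nil => simp [pvG, List.modifyHead, pvDecWord_eq_map]
        | cons v vs =>
          simp only [List.modifyHead, pvG, pvDecWord_eq_map, List.map_cons, List.length_cons]
          rw [show k + 1 + (w.length : Int) = k + ↑(w.length + 1) by push_cast; ring]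
          simp

-- the initial while loop computes the first word's length
theorem pv_count_eq_headLen (l : List Char) :
    pvCountNonSpace l = (((pvSplit l).headD []).length : Int) := by
  induction l with
  | nil => simp [pvCountNonSpace, pvSplit]
  | cons c r ih =>
    by_cases hc : c = ' '
    · subst hc; simp [pvCountNonSpace, pvSplit]
    · simp only [pvCountNonSpace, if_neg hc, pvSplit, ih]
      cases hs : pvSplit r with
      | nil => exact absurd hs (pvSplit_ne_nil r)
      | cons w ws => simp [List.modifyHead]; ring

-- ===== VERDICT (by name: the statement is the Claim_ definition above) =====
theorem linked_word_decrypt_spec : Claim_equal_linked_word_decrypt := by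
  intro text _
  unfold Spec_linked_word_decrypt linked_word_decrypt linked_word_decrypt_alt
  simp only [pv_splitOn_eq, pv_count_eq_headLen]
  rw [pv_charfold_eq_F, pv_F_eq_G]
  cases h : pvSplit text.toList with
  | nil => exact absurd h (pvSplit_ne_nil text.toList)
  | cons w ws =>
    simp only [List.headD]
    rw [pv_foldl_eq_zip]
    simp only [List.nil_append]
    rw [pv_join_zip_eq_G]
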